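-- pv_equiv track=rewrite | github.com/Ayazxdev/MeritHire | agents_files/Clean_Hiring_System/skill_verification_agent/agents/skill_verification_agent_v2.py | _tier_skills
-- ===== SOURCE A (Python) =====
-- from typing import Dict, List, Optional
--
-- def _tier_skills(skills: List[str]) -> Dict[str, List[str]]:
--     """
--     Categorize skills into tiers for better matching precision.
--     """
--     tiers = {
--         "core": [],
--         "frameworks": [],
--         "infrastructure": [],
--         "tools": []
--     }
--
--     # Simple keyword matching taxonomy
--     TAXONOMY = {
--         "core": ["python", "javascript", "java", "c++", "c", "go", "rust", "sql", "html", "css", "typescript", "ruby", "php", "swift", "kotlin", "algorithms", "data structures", "machine learning", "deep learning", "computer vision", "nlp"],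
--         "frameworks": ["react", "react.js", "angular", "vue", "django", "flask", "spring", "express", "next.js", "node.js", "tensorflow", "pytorch", "keras", "opencv", "yolo", "fastapi"],
--         "infrastructure": ["aws", "azure", "gcp", "docker", "kubernetes", "terraform", "jenkins", "linux", "unix", "bash", "shell"],
--         "tools": ["git", "github", "gitlab", "postman", "vs code", "jira", "trello", "slack", "office", "excel", "powerpoint"]
--     }
--
--     for skill in skills:
--         skill_lower = skill.lower()
--         categorized = False
--
--         for tier, keywords in TAXONOMY.items():
--             if any(k == skill_lower for k in keywords) or \
--                any(k in skill_lower and len(k) > 4 for k in ["framework", "library", "tool"]): # Heuristic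
--                  if skill_lower in keywords:
--                     tiers[tier].append(skill)
--                     categorized = True
--                     break
--
--         # Fallback based on common heuristics if exact match not found
--         if not categorized:
--             if "framework" in skill_lower or ".js" in skill_lower:
--                 tiers["frameworks"].append(skill)
--             elif "tool" in skill_lower:
--                 tiers["tools"].append(skill)
--             else:
--                 # Default high-value to core
--                 tiers["core"].append(skill)
--
--     return tiers
-- ===== SOURCE B (Python) =====
-- from typing import Dict, List
--
-- TAXONOMY = {
--     "core": ["python", "javascript", "java", "c++", "c", "go", "rust", "sql", "html", "css", "typescript", "ruby", "php", "swift", "kotlin", "algorithms", "data structures", "machine learning", "deep learning", "computer vision", "nlp"],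
--     "frameworks": ["react", "react.js", "angular", "vue", "django", "flask", "spring", "express", "next.js", "node.js", "tensorflow", "pytorch", "keras", "opencv", "yolo", "fastapi"],
--     "infrastructure": ["aws", "azure", "gcp", "docker", "kubernetes", "terraform", "jenkins", "linux", "unix", "bash", "shell"],
--     "tools": ["git", "github", "gitlab", "postman", "vs code", "jira", "trello", "slack", "office", "excel", "powerpoint"],
-- }
--
-- # One flat keyword -> tier index built once (no cross-tier duplicate keywords).
-- FLAT = {k: tier for tier, ks in TAXONOMY.items() for k in ks}
--
-- def _tier_skills(skills: List[str]) -> Dict[str, List[str]]: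
--     tiers = {"core": [], "frameworks": [], "infrastructure": [], "tools": []}
--     for skill in skills:
--         sl = skill.lower()
--         tier = FLAT.get(sl)
--         if tier is None:
--             if "framework" in sl or ".js" in sl:
--                 tier = "frameworks"
--             elif "tool" in sl:
--                 tier = "tools"
--             else:
--                 tier = "core"
--         tiers[tier].append(skill)
--     return tiers
-- ===== Notes on version B (the rewrite author's own statement) =====
-- stated objective: faster
-- what changed: Replaces A's per-skill scan over all four tiers (with a dead 'framework/library/tool' heuristic guard re-checked by an inner membership test) by a single inverted keyword-to-tier dict built once, so each skill is classified by one hashed lookup plus the unchanged fallback chain.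
import Mathlib
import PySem

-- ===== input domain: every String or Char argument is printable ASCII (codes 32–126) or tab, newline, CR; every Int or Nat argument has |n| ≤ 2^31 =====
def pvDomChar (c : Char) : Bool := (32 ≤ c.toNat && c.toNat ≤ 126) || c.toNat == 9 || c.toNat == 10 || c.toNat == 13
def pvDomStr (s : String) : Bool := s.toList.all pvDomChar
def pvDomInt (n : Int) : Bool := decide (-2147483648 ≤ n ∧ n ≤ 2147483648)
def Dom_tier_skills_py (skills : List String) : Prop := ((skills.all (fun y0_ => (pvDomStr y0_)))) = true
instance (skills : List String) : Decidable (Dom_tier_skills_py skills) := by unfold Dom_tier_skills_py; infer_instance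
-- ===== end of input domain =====

-- B replaces A's per-skill scan over all four tiers (with its dead heuristic guard) by one
-- inverted keyword→tier dictionary built once, classifying each skill with a single lookup (simpler).


-- Shared data literal (both Pythons contain the same TAXONOMY table).
def pvTaxonomy : List (String × List String) :=
  [("core", ["python", "javascript", "java", "c++", "c", "go", "rust", "sql", "html", "css", "typescript", "ruby", "php", "swift", "kotlin", "algorithms", "data structures", "machine learning", "deep learning", "computer vision", "nlp"]),
   ("frameworks", ["react", "react.js", "angular", "vue", "django", "flask", "spring", "express", "next.js", "node.js", "tensorflow", "pytorch", "keras", "opencv", "yolo", "fastapi"]),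
   ("infrastructure", ["aws", "azure", "gcp", "docker", "kubernetes", "terraform", "jenkins", "linux", "unix", "bash", "shell"]),
   ("tools", ["git", "github", "gitlab", "postman", "vs code", "jira", "trello", "slack", "office", "excel", "powerpoint"])]

def pvInitTiers : PySem.Dict String (List String) :=
  ((((PySem.Dict.empty).insert "core" []).insert "frameworks" []).insert "infrastructure" []).insert "tools" []

-- ===== PORT A =====
-- one iteration of A's outer loop (sl = skill.lower() passed in): the tier scan with
-- break flag, then the fallback chain
def pvStepACore (tiers : PySem.Dict String (List String)) (skill sl : String) :
    PySem.Dict String (List String) :=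
  let st := pvTaxonomy.foldl
    (fun (st : PySem.Dict String (List String) × Bool) tk =>
      if st.2 then st  -- simulates Python's `break`
      else if (tk.2.any (fun k => k == sl)) ||
              (["framework", "library", "tool"].any
                (fun k => PySem.Str.isIn k sl && decide (PySem.Str.len k > 4))) then
        if tk.2.contains sl then (st.1.modify tk.1 [] (fun l => l ++ [skill]), true)
        else st
      else st)
    (tiers, false)
  if st.2 then st.1
  else if PySem.Str.isIn "framework" sl || PySem.Str.isIn ".js" sl then
    st.1.modify "frameworks" [] (fun l => l ++ [skill])
  else if PySem.Str.isIn "tool" sl then st.1.modify "tools" [] (fun l => l ++ [skill])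
  else st.1.modify "core" [] (fun l => l ++ [skill])

def pvStepA (tiers : PySem.Dict String (List String)) (skill : String) :
    PySem.Dict String (List String) :=
  pvStepACore tiers skill (PySem.Str.lower skill)

def tier_skills_py (skills : List String) : List (String × List String) :=
  (skills.foldl pvStepA pvInitTiers).items

-- ===== PORT B =====
-- FLAT = {k: tier for tier, ks in TAXONOMY.items() for k in ks}
def pvFlat : PySem.Dict String String :=
  pvTaxonomy.foldl (fun d tk => tk.2.foldl (fun d k => d.insert k tk.1) d) PySem.Dict.empty

def pvStepBCore (tiers : PySem.Dict String (List String)) (skill sl : String) :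
    PySem.Dict String (List String) :=
  let tier :=
    match pvFlat.get? sl with
    | some t => t
    | none =>
      if PySem.Str.isIn "framework" sl || PySem.Str.isIn ".js" sl then "frameworks"
      else if PySem.Str.isIn "tool" sl then "tools"
      else "core"
  tiers.modify tier [] (fun l => l ++ [skill])

def pvStepB (tiers : PySem.Dict String (List String)) (skill : String) :
    PySem.Dict String (List String) :=
  pvStepBCore tiers skill (PySem.Str.lower skill)

def tier_skills_py_alt (skills : List String) : List (String × List String) :=
  (skills.foldl pvStepB pvInitTiers).items

-- ===== PRECONDITION & SPEC =====
def Spec_tier_skills_py (skills : List String) (out : List (String × List String)) : Prop := out = tier_skills_py_alt skills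
instance (skills : List String) (out : List (String × List String)) : Decidable (Spec_tier_skills_py skills out) := by unfold Spec_tier_skills_py; infer_instance

-- ===== CLAIM (what is proved, stated in full; the proofs are below) =====
def Claim_equal_tier_skills_py : Prop := ∀ (skills : List String), Dom_tier_skills_py skills → Spec_tier_skills_py skills (tier_skills_py skills)

-- ===== LEMMAS AND PROOFS =====
-- proof-side helper: the flattened keyword list, in taxonomy order
def pvKws : List String := pvTaxonomy.flatMap Prod.snd

-- A's inner tier scan leaves the state untouched when sl matches no keyword list
theorem pvFoldA_unchanged (skill sl : String) (L : List (String × List String))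
    (h : ∀ p ∈ L, sl ∉ p.2) (d : PySem.Dict String (List String)) :
    L.foldl
      (fun (st : PySem.Dict String (List String) × Bool) tk =>
        if st.2 then st
        else if (tk.2.any (fun k => k == sl)) ||
                (["framework", "library", "tool"].any
                  (fun k => PySem.Str.isIn k sl && decide (PySem.Str.len k > 4))) then
          if tk.2.contains sl then (st.1.modify tk.1 [] (fun l => l ++ [skill]), true)
          else st
        else st)
      (d, false) = (d, false) := by
  induction L with
  | nil => rfl
  | cons p L ih =>
    rw [List.foldl_cons]
    have hc : p.2.contains sl = false := by simp [h p (List.mem_cons_self)]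
    simp only [hc]
    split_ifs <;> exact ih (fun q hq => h q (List.mem_cons_of_mem _ hq))

set_option maxRecDepth 8000 in
set_option maxHeartbeats 4000000 in
theorem pvStepCore_eq (d : PySem.Dict String (List String)) (skill sl : String) :
    pvStepACore d skill sl = pvStepBCore d skill sl := by
  by_cases hs : sl ∈ pvKws
  · -- sl is one of the 59 keywords: both steps reduce to the same modify
    simp [pvKws, pvTaxonomy] at hs
    rcases hs with rfl|rfl|rfl|rfl|rfl|rfl|rfl|rfl|rfl|rfl|rfl|rfl|rfl|rfl|rfl|rfl|rfl|rfl|rfl|rfl|rfl|rfl|rfl|rfl|rfl|rfl|rfl|rfl|rfl|rfl|rfl|rfl|rfl|rfl|rfl|rfl|rfl|rfl|rfl|rfl|rfl|rfl|rfl|rfl|rfl|rfl|rfl|rfl|rfl|rfl|rfl|rfl|rfl|rfl|rfl|rfl|rfl|rfl|rfl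
    all_goals rfl
  · -- sl matches no keyword: A falls through its scan, B's lookup misses; same fallback
    have hA := pvFoldA_unchanged skill sl pvTaxonomy
      (fun p hp hm => hs (List.mem_flatMap.mpr ⟨p, hp, hm⟩)) d
    have hB : pvFlat.get? sl = none := by
      rw [PySem.Dict.get?_eq_none_iff_not_mem_keys,
        show pvFlat.keys = pvKws from by decide]
      exact hs
    unfold pvStepACore pvStepBCore
    rw [hA, hB]
    split_ifs <;> rfl

theorem pvStep_eq (d : PySem.Dict String (List String)) (skill : String) :
    pvStepA d skill = pvStepB d skill := pvStepCore_eq d skill _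

-- ===== VERDICT (by name: the statement is the Claim_ definition above) =====
theorem tier_skills_py_spec : Claim_equal_tier_skills_py := by
  intro skills hdom
  clear hdom
  unfold Spec_tier_skills_py tier_skills_py tier_skills_py_alt
  congr 1
  generalize pvInitTiers = d
  induction skills generalizing d with
  | nil => rfl
  | cons x xs ih => rw [List.foldl_cons, List.foldl_cons, pvStep_eq]; apply ih
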